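-- pv_equiv track=rewrite | github.com/victoriaferrario/uba-intro-programacion | guiasPracticas/guia7.py | saldoActual
-- ===== SOURCE A (Python) =====
-- def saldoActual (t: list[tuple()]) -> int:
--     saldo = 0
--     for movimiento in t :
--         if movimiento[0] == "I":
--             saldo += movimiento[1]
--         else: # en otro caso debe ser "R" de retiro, resto
--             saldo = saldo - movimiento[1]
--     return saldo
-- ===== SOURCE B (Python) =====
-- def saldoActual(t: list[tuple()]) -> int:
--     depositos = sum(m[1] for m in t if m[0] == "I")
--     retiros = sum(m[1] for m in t if m[0] != "I")
--     return depositos - retiros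
-- ===== Notes on version B (the rewrite author's own statement) =====
-- stated objective: alternative
-- what changed: Replaces the single running signed accumulator with a partition-then-subtract decomposition: sum deposits and withdrawals in two separate filtered passes and return their difference.
import Mathlib
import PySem

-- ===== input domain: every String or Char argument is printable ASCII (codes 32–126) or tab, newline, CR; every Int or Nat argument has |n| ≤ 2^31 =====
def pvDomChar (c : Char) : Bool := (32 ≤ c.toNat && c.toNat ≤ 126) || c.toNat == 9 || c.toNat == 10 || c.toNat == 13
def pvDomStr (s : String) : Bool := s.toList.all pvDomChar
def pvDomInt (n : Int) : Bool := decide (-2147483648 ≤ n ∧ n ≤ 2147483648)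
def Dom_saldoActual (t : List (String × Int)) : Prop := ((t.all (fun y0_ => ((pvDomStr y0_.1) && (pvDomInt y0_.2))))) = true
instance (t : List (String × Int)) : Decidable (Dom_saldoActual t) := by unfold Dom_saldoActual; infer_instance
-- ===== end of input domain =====

-- ===== PORT A =====
-- B changes the decomposition: two filtered sums (deposits minus withdrawals) instead of one branching accumulator.
def saldoActual (t : List (String × Int)) : Int :=
  t.foldl (fun saldo movimiento =>
    if movimiento.1 == "I" then saldo + movimiento.2 else saldo - movimiento.2) 0

-- ===== PORT B =====
def saldoActual_alt (t : List (String × Int)) : Int :=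
  let depositos := ((t.filter (fun m => m.1 == "I")).map (fun m => m.2)).sum
  let retiros := ((t.filter (fun m => m.1 != "I")).map (fun m => m.2)).sum
  depositos - retiros

-- ===== PRECONDITION & SPEC =====
def Spec_saldoActual (t : List (String × Int)) (out : Int) : Prop := out = saldoActual_alt t
instance (t : List (String × Int)) (out : Int) : Decidable (Spec_saldoActual t out) := by unfold Spec_saldoActual; infer_instance

-- ===== CLAIM (what is proved, stated in full; the proofs are below) =====
def Claim_equal_saldoActual : Prop := ∀ (t : List (String × Int)), Dom_saldoActual t → Spec_saldoActual t (saldoActual t)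

-- ===== LEMMAS AND PROOFS =====

-- ===== VERDICT (by name: the statement is the Claim_ definition above) =====
lemma saldo_shift (t : List (String × Int)) (s : Int) :
    t.foldl (fun saldo movimiento =>
      if movimiento.1 == "I" then saldo + movimiento.2 else saldo - movimiento.2) s
    = s + ((t.filter (fun m => m.1 == "I")).map (fun m => m.2)).sum
        - ((t.filter (fun m => m.1 != "I")).map (fun m => m.2)).sum := by
  induction t generalizing s with
  | nil => simp
  | cons h tl ih =>
    simp only [List.foldl_cons, List.filter_cons]
    rw [ih]
    by_cases hh : h.1 = "I" <;> simp [hh] <;> ring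

theorem saldoActual_spec : Claim_equal_saldoActual := by
  intro t _
  unfold Spec_saldoActual saldoActual saldoActual_alt
  rw [saldo_shift]
  simp
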